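-- pv_equiv track=rewrite | github.com/spoonbobo/arc2024 | curriculum/arcdsl.py | vupscale
-- ===== SOURCE A (Python) =====
-- from typing import (
--     Any,
--     Tuple,
--     FrozenSet,
--     Callable,
--     Container,
--     Union
-- )
--
-- def vupscale(
--     grid: Tuple[Tuple[int]],
--     factor: int
-- ) -> Tuple[Tuple[int]]:
--     """ upscale grid vertically """
--     g = tuple()
--     for row in grid:
--         g = g + tuple(row for num in range(factor))
--     return g
-- ===== SOURCE B (Python) =====
-- def vupscale(grid, factor):
--     """ upscale grid vertically """
--     if not grid:
--         return ()
--     return (grid[0],) * factor + vupscale(grid[1:], factor)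
-- ===== Notes on version B (the rewrite author's own statement) =====
-- stated objective: simpler
-- what changed: Replaced A's iterative accumulate-and-concatenate loop with a generator expression by a structural recursion that emits (grid[0],)*factor copies via tuple repetition and recurses on the tail.
import Mathlib
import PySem

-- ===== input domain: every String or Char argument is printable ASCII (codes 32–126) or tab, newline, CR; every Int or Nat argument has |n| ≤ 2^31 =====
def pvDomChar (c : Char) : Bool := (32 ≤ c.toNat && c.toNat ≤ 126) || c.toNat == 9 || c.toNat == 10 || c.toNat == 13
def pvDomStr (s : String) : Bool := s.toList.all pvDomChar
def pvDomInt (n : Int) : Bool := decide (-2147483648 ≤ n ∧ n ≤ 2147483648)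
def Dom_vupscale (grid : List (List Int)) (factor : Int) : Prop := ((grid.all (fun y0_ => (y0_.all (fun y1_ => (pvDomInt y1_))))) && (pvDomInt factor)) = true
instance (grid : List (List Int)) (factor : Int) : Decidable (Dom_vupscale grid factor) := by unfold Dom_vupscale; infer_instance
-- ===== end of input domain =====

-- B replaces A's iterative accumulate-and-concatenate loop by a structural recursion using tuple repetition (simpler; return-value equivalence).

-- ===== PORT A =====
-- g = (); for row in grid: g = g + tuple(row for num in range(factor)); return g
def vupscale (grid : List (List Int)) (factor : Int) : List (List Int) :=
  grid.foldl (fun g row => g ++ (PySem.List.pyRange 0 factor 1).map (fun _ => row)) []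

-- ===== PORT B =====
-- if not grid: return (); return (grid[0],)*factor + vupscale(grid[1:], factor)
-- Python tuple repetition (t,)*factor yields () for factor <= 0, exactly List.replicate factor.toNat
def vupscale_alt (grid : List (List Int)) (factor : Int) : List (List Int) :=
  match grid with
  | [] => []
  | r :: rest => List.replicate factor.toNat r ++ vupscale_alt rest factor

-- ===== PRECONDITION & SPEC =====
def Spec_vupscale (grid : List (List Int)) (factor : Int) (out : List (List Int)) : Prop := out = vupscale_alt grid factor
instance (grid : List (List Int)) (factor : Int) (out : List (List Int)) : Decidable (Spec_vupscale grid factor out) := by unfold Spec_vupscale; infer_instance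

-- ===== CLAIM (what is proved, stated in full; the proofs are below) =====
def Claim_equal_vupscale : Prop := ∀ (grid : List (List Int)) (factor : Int), Dom_vupscale grid factor → Spec_vupscale grid factor (vupscale grid factor)

-- ===== LEMMAS AND PROOFS =====

-- A's loop is an accumulated flatMap of factor copies of each row
theorem vupscale_eq_flatMap (grid : List (List Int)) (factor : Int) :
    vupscale grid factor = grid.flatMap (fun r => List.replicate (factor.toNat) r) := by
  unfold vupscale
  rw [PySem.List.foldl_append_eq_flatMap]
  simp only [List.nil_append]
  congr 1
  funext r
  rw [List.eq_replicate_iff]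
  refine ⟨by simp [PySem.List.length_pyRange_one], ?_⟩
  intro b hb
  simp only [List.mem_map] at hb
  obtain ⟨_, _, h⟩ := hb
  exact h.symm

-- B's recursion is the same flatMap
theorem vupscale_alt_eq_flatMap (grid : List (List Int)) (factor : Int) :
    vupscale_alt grid factor = grid.flatMap (fun r => List.replicate (factor.toNat) r) := by
  induction grid with
  | nil => rfl
  | cons r rest ih => simp [vupscale_alt, ih]

-- ===== VERDICT (by name: the statement is the Claim_ definition above) =====
theorem vupscale_spec : Claim_equal_vupscale := by
  intro grid factor _
  unfold Spec_vupscale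
  rw [vupscale_eq_flatMap, vupscale_alt_eq_flatMap]
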